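-- pv_equiv track=rewrite | github.com/Bern4rd0e/Algoritmos | Introducao/q08_paresQuantos.py | pares_quantos
-- ===== SOURCE A (Python) =====
-- def pares_quantos(lista, s, i=0):
--
--     if len(lista) == 0 or i >= len(lista) - 1:
--         return 0
--
--     somaPares = lista[i] + lista[i + 1]
--
--     if somaPares == s:
--         return 1 + pares_quantos(lista, s, i + 1)
--
--     else:
--         return pares_quantos(lista, s, i + 1)
-- ===== SOURCE B (Python) =====
-- def pares_quantos(lista, s, i=0):
--     if not lista:
--         return 0
--     return sum(1 for j in range(i, len(lista) - 1) if lista[j] + lista[j + 1] == s)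
-- ===== Notes on version B (the rewrite author's own statement) =====
-- stated objective: idiomatic
-- what changed: Replaces the recursion that re-enters the function for every index with a single generator-sum over range(i, len(lista)-1), counting adjacent pairs in one pass with an accumulator.
import Mathlib
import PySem

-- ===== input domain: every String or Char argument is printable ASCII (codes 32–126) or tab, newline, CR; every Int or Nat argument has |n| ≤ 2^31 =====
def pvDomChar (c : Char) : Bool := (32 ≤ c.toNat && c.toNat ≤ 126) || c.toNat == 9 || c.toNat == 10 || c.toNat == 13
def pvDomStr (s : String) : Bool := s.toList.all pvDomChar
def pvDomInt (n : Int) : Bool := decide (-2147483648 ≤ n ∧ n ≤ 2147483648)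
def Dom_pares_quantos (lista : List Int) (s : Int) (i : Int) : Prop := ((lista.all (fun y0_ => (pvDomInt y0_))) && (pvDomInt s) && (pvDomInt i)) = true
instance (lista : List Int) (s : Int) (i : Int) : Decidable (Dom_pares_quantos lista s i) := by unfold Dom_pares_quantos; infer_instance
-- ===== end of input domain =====

-- B counts the adjacent pairs with a single generator-sum over range(i, len-1) instead of A's recursion; idiomatic, same cost.

-- ===== PORT A =====
def pares_quantos (lista : List Int) (s : Int) (i : Int) : Int :=
  if lista.length = 0 ∨ (lista.length : Int) - 1 ≤ i then 0
  else
    let somaPares := (PySem.List.pyGet? lista i).getD 0 + (PySem.List.pyGet? lista (i + 1)).getD 0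
    if somaPares = s then 1 + pares_quantos lista s (i + 1)
    else pares_quantos lista s (i + 1)
termination_by ((lista.length : Int) - i).toNat
decreasing_by all_goals · simp only [not_or] at *; omega

-- ===== PORT B =====
def pares_quantos_alt (lista : List Int) (s : Int) (i : Int) : Int :=
  if lista.isEmpty then 0
  else
    (PySem.List.pyRange i ((lista.length : Int) - 1) 1).foldl
      (fun c j =>
        c + (if (PySem.List.pyGet? lista j).getD 0 + (PySem.List.pyGet? lista (j + 1)).getD 0 = s
             then 1 else 0)) 0

-- ===== PRECONDITION & SPEC =====
-- Pre_ excludes exactly the inputs where the Python A raises IndexError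
-- (nonempty list with i < -len reached by the recursion); B raises there too.
def Pre_pares_quantos (lista : List Int) (s : Int) (i : Int) : Prop :=
  lista = [] ∨ (lista.length : Int) - 1 ≤ i ∨ -(lista.length : Int) ≤ i
instance (lista : List Int) (s : Int) (i : Int) : Decidable (Pre_pares_quantos lista s i) := by unfold Pre_pares_quantos; infer_instance
def pvWitness_pares_quantos : List Int × Int × Int := ([1, 2, 3, 1], 3, 0)

def Spec_pares_quantos (lista : List Int) (s : Int) (i : Int) (out : Int) : Prop := out = pares_quantos_alt lista s i
instance (lista : List Int) (s : Int) (i : Int) (out : Int) : Decidable (Spec_pares_quantos lista s i out) := by unfold Spec_pares_quantos; infer_instance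

-- ===== CLAIM (what is proved, stated in full; the proofs are below) =====
def Claim_equal_pares_quantos : Prop := ∀ (lista : List Int) (s : Int) (i : Int), Dom_pares_quantos lista s i → Pre_pares_quantos lista s i → Spec_pares_quantos lista s i (pares_quantos lista s i)

-- ===== LEMMAS AND PROOFS =====

-- A's recursion equals B's fold over the remaining range, for any start i ≥ -len.
theorem pares_quantos_eq_fold (lista : List Int) (s : Int) :
    ∀ (i : Int), -(lista.length : Int) ≤ i → lista ≠ [] →
      pares_quantos lista s i =
        (PySem.List.pyRange i ((lista.length : Int) - 1) 1).foldl
          (fun c j =>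
            c + (if (PySem.List.pyGet? lista j).getD 0 + (PySem.List.pyGet? lista (j + 1)).getD 0 = s
                 then 1 else 0)) 0 := by
  intro i hi hne
  by_cases hstop : (lista.length : Int) - 1 ≤ i
  · rw [pares_quantos, PySem.List.pyRange_one_eq_nil hstop]
    simp [List.length_eq_zero_iff, hne, hstop]
  · rw [not_le] at hstop
    rw [pares_quantos, PySem.List.pyRange_one_cons hstop]
    have hrec := pares_quantos_eq_fold lista s (i + 1) (by omega) hne
    simp only [List.length_eq_zero_iff, hne, false_or, not_le.mpr hstop, if_false, List.foldl_cons, zero_add]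
    rw [PySem.List.foldl_add] at hrec ⊢
    split_ifs with h <;> rw [hrec] <;> ring
termination_by i => ((lista.length : Int) - i).toNat
decreasing_by omega

-- ===== VERDICT (by name: the statement is the Claim_ definition above) =====
theorem pares_quantos_spec : Claim_equal_pares_quantos := by
  intro lista s i _ hpre
  unfold Spec_pares_quantos pares_quantos_alt
  by_cases hne : lista = []
  · subst hne; simp [pares_quantos]
  · have hlen : 1 ≤ (lista.length : Int) := by
      have := List.length_pos_iff.mpr hne; omega
    have hge : -(lista.length : Int) ≤ i := by
      rcases hpre with h | h | h
      · exact absurd h hne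
      · omega
      · exact h
    simp only [List.isEmpty_iff, hne]
    exact pares_quantos_eq_fold lista s i hge hne
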